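-- pv_equiv track=rewrite | github.com/TheCoderNamedBridget/Python-Practice | The_Field_problems.py | my_lists
-- ===== SOURCE A (Python) =====
-- def my_lists(L):
--     '''
--     >>> my_lists([1,2,4])
--     [[1], [1, 2], [1, 2, 3, 4]]
--     >>> my_lists([0,3])
--     [[], [1, 2, 3]]
--     '''
--     W = []
--     for i in L:
--         P = []
--         k = 1
--         for t in range(i):
--             P.append(t+1)
--         W.append(P)
--     return W
-- ===== SOURCE B (Python) =====
-- def my_lists(L):
--     m = max(L, key=lambda x: x, default=0)
--     full = list(range(1, m + 1))
--     return [full[:max(i, 0)] for i in L]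
-- ===== Notes on version B (the rewrite author's own statement) =====
-- stated objective: alternative
-- what changed: B precomputes the single longest list range(1, max(L)+1) once and returns each answer as a slice full[:max(i,0)] of that table, instead of A's nested loop rebuilding [1..i] element by element for every i.
import Mathlib
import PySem

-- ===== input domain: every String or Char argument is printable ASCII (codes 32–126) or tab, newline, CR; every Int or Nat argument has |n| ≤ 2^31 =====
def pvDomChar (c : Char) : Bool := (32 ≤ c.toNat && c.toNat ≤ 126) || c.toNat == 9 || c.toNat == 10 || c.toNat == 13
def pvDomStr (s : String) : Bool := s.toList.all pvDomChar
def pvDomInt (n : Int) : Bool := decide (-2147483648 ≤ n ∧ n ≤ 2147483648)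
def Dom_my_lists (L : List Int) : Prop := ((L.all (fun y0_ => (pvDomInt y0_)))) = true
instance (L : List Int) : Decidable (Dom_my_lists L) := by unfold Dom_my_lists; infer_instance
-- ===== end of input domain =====

-- B builds the longest range once and answers each query by slicing it; A rebuilds each prefix element by element.

-- ===== PORT A =====
def my_lists (L : List Int) : List (List Int) :=
  L.foldl (fun W i =>
    W ++ [(PySem.List.pyRange 0 i 1).foldl (fun P t => P ++ [t + 1]) []]) []

-- ===== PORT B =====
def my_lists_alt (L : List Int) : List (List Int) :=
  let m := PySem.List.maxD L (fun x => x) 0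
  let full := PySem.List.pyRange 1 (m + 1) 1
  L.map (fun i => PySem.List.slice full none (some (max i 0)))

-- ===== PRECONDITION & SPEC =====
def Spec_my_lists (L : List Int) (out : List (List Int)) : Prop := out = my_lists_alt L
instance (L : List Int) (out : List (List Int)) : Decidable (Spec_my_lists L out) := by unfold Spec_my_lists; infer_instance

-- ===== CLAIM (what is proved, stated in full; the proofs are below) =====
def Claim_equal_my_lists : Prop := ∀ (L : List Int), Dom_my_lists L → Spec_my_lists L (my_lists L)

-- ===== LEMMAS AND PROOFS =====

-- The slice of the precomputed table agrees with A's element-by-element prefix, for any i ≤ m.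
theorem slice_table_eq (i m : Int) (him : i ≤ m) :
    PySem.List.slice (PySem.List.pyRange 1 (m + 1) 1) none (some (max i 0))
      = (PySem.List.pyRange 0 i 1).foldl (fun P t => P ++ [t + 1]) [] := by
  rw [PySem.List.foldl_append_singleton_eq_map, List.nil_append]
  rw [PySem.List.slice_to _ (le_max_right i 0)]
  rw [PySem.List.pyRange_one, PySem.List.pyRange_one]
  rw [← List.map_take, List.take_range]
  have h2 : min (max i 0).toNat (m + 1 - 1).toNat = (i - 0).toNat := by omega
  rw [h2, List.map_map]
  apply List.map_congr_left
  intro k _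
  simp [Function.comp]
  omega

theorem my_lists_eq_map (L : List Int) :
    my_lists L = L.map (fun i => (PySem.List.pyRange 0 i 1).foldl (fun P t => P ++ [t + 1]) []) := by
  unfold my_lists
  rw [PySem.List.foldl_append_singleton_eq_map, List.nil_append]

-- ===== VERDICT (by name: the statement is the Claim_ definition above) =====
theorem my_lists_spec : Claim_equal_my_lists := by
  intro L _
  unfold Spec_my_lists my_lists_alt
  rw [my_lists_eq_map]
  apply List.map_congr_left
  intro i hi
  exact (slice_table_eq i _ (PySem.List.le_maxD_id L 0 i hi)).symm
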